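-- pv_equiv track=rewrite | github.com/need-singularity/sylvian-singularity | verify/verify_qcomp_009_weight_enumerator.py | macwilliams_transform
-- ===== SOURCE A (Python) =====
-- import math
--
-- def krawtchouk(n, q, w, j):
--     """Krawtchouk polynomial K_w(j; n, q).
--     K_w(j) = sum_{s=0}^{w} (-1)^s * C(j,s) * C(n-j, w-s) * (q-1)^(w-s)
--     For binary codes, q=2.
--     """
--     val = 0
--     for s in range(min(w, j) + 1):
--         if w - s > n - j:
--             continue
--         term = ((-1) ** s) * math.comb(j, s) * math.comb(n - j, w - s)
--         term *= (q - 1) ** (w - s)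
--         val += term
--     return val
--
-- def macwilliams_transform(A, n, code_size):
--     """Apply MacWilliams identity to get dual weight enumerator.
--     B_w = (1/|C|) * sum_{j=0}^{n} A_j * K_w(j; n, 2)
--     """
--     B = []
--     for w in range(n + 1):
--         val = 0
--         for j in range(n + 1):
--             val += A[j] * krawtchouk(n, 2, w, j)
--         B.append(val // code_size)  # Should be integer for valid codes
--     return B
-- ===== SOURCE B (Python) =====
-- def macwilliams_transform(A, n, code_size):
--     """O(n^2): K_w(j;n,2) is the x^w coefficient of (1-x)^j (1+x)^(n-j); rows for
--     successive j are produced by an O(n) scan from the previous row."""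
--     if n < 0:
--         return []
--     # row for j=0: coefficients of (1+x)^n, built by n convolutions with (1+x)
--     row = [1] + [0] * n
--     for _ in range(n):
--         row = [row[0]] + [a + b for a, b in zip(row[1:], row)]
--     acc = [A[0] * c for c in row]
--     for j in range(1, n + 1):
--         # (1+x)p_{j+1} = (1-x)p_j gives: new[0]=row[0], new[w] = (row[w]-row[w-1]) - new[w-1]
--         new = [row[0]]
--         for d in (b - a for a, b in zip(row, row[1:])):
--             new.append(d - new[-1])
--         row = new
--         acc = [t + A[j] * c for t, c in zip(acc, row)]
--     return [t // code_size for t in acc]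
-- ===== Notes on version B (the rewrite author's own statement) =====
-- stated objective: faster
-- what changed: Replaces the per-entry Krawtchouk binomial sums (an O(n) sum for each of the (n+1)^2 matrix entries) by rows of coefficients of (1-x)^j(1+x)^(n-j), each row derived from the previous one by an O(n) scan, accumulating the dual enumerator in one pass; intended as faster (O(n^2) vs O(n^3)): a timing run measured B 56.8x faster at n=256, the largest size A finished (A timed out beyond).
import Mathlib
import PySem

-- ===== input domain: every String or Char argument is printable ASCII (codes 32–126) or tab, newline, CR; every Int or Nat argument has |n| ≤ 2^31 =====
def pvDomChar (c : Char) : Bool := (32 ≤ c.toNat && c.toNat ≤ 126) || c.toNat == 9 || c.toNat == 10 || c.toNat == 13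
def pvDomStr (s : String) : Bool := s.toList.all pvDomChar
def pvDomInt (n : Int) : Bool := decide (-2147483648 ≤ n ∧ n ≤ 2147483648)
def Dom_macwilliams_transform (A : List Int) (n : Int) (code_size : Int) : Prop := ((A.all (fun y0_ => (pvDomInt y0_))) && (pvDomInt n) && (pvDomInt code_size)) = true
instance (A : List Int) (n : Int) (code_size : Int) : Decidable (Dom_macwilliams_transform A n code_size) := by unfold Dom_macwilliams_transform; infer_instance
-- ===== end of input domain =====

-- B replaces A's O(n) Krawtchouk binomial sum per matrix entry by an O(n) scan per ROW
-- (rows are coefficient lists of (1-x)^j (1+x)^(n-j)): O(n^2) work instead of O(n^3);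
-- intended as faster (timing: 56.8x at n=256, the largest size A finished).

-- ===== PORT A =====
-- math.comb a b; exact for 0 ≤ a, 0 ≤ b (the only arguments A's calls reach inside Pre_)
def pyComb (a b : Int) : Int := (Nat.choose a.toNat b.toNat : Int)

def krawtchouk (n q w j : Int) : Int :=
  (PySem.List.pyRange 0 (min w j + 1) 1).foldl (fun val s =>
    if w - s > n - j then val
    else
      -- (-1) ** s and (q-1) ** (w-s): exponents nonnegative on every executed iteration
      let term := ((-1 : Int) ^ s.toNat) * pyComb j s * pyComb (n - j) (w - s)
      let term := term * (q - 1) ^ (w - s).toNat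
      val + term) 0

def macwilliams_transform (A : List Int) (n : Int) (code_size : Int) : List Int :=
  (PySem.List.pyRange 0 (n + 1) 1).foldl (fun B w =>
    let val := (PySem.List.pyRange 0 (n + 1) 1).foldl (fun val j =>
      val + PySem.List.pyGetD A j 0 * krawtchouk n 2 w j) 0
    B ++ [PySem.Int.floordiv val code_size]) []

-- ===== PORT B =====
-- row = [row[0]] + [a + b for a, b in zip(row[1:], row)]
def pascalNext (row : List Int) : List Int :=
  row.headD 0 :: (row.tail.zip row).map (fun p => p.1 + p.2)

-- the 'for d in …: new.append(d - new[-1])' scan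
def scanNeg : Int → List Int → List Int
  | _, [] => []
  | prev, d :: ds => (d - prev) :: scanNeg (d - prev) ds

def nextKRow (row : List Int) : List Int :=
  row.headD 0 :: scanNeg (row.headD 0) ((row.zip row.tail).map (fun p => p.2 - p.1))

def macwilliams_transform_alt (A : List Int) (n : Int) (code_size : Int) : List Int :=
  if n < 0 then []
  else
    let row0 := pascalNext^[n.toNat] ((1 : Int) :: List.replicate n.toNat 0)
    let acc0 := row0.map (fun c => PySem.List.pyGetD A 0 0 * c)
    let st := (PySem.List.pyRange 1 (n + 1) 1).foldl
      (fun (st : List Int × List Int) j =>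
        let row := nextKRow st.2
        ((st.1.zip row).map (fun p => p.1 + PySem.List.pyGetD A j 0 * p.2), row))
      (acc0, row0)
    st.1.map (fun t => PySem.Int.floordiv t code_size)

-- ===== PRECONDITION & SPEC =====
-- Pre_ excludes exactly the inputs where Python A raises: for n ≥ 0 it needs
-- code_size ≠ 0 (ZeroDivisionError) and n < len(A) (IndexError on A[j]).
def Pre_macwilliams_transform (A : List Int) (n : Int) (code_size : Int) : Prop :=
  0 ≤ n → (code_size ≠ 0 ∧ n < (A.length : Int))
instance (A : List Int) (n : Int) (code_size : Int) : Decidable (Pre_macwilliams_transform A n code_size) := by unfold Pre_macwilliams_transform; infer_instance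

def pvWitness_macwilliams_transform : List Int × Int × Int := ([1, 0, 1], 2, 2)

def Spec_macwilliams_transform (A : List Int) (n : Int) (code_size : Int) (out : List Int) : Prop := out = macwilliams_transform_alt A n code_size
instance (A : List Int) (n : Int) (code_size : Int) (out : List Int) : Decidable (Spec_macwilliams_transform A n code_size out) := by unfold Spec_macwilliams_transform; infer_instance

-- ===== CLAIM (what is proved, stated in full; the proofs are below) =====
def Claim_equal_macwilliams_transform : Prop := ∀ (A : List Int) (n : Int) (code_size : Int), Dom_macwilliams_transform A n code_size → Pre_macwilliams_transform A n code_size → Spec_macwilliams_transform A n code_size (macwilliams_transform A n code_size)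

-- ===== LEMMAS AND PROOFS =====

-- the mathematical Krawtchouk number K_w(j; n, 2), all indices natural
def Kpoly (n j w : ℕ) : ℤ :=
  ∑ s ∈ Finset.range (w + 1), (-1 : ℤ) ^ s * (j.choose s : ℤ) * ((n - j).choose (w - s) : ℤ)

theorem Kpoly_w_zero (n j : ℕ) : Kpoly n j 0 = 1 := by
  simp [Kpoly]

theorem Kpoly_j_zero (n w : ℕ) : Kpoly n 0 w = (n.choose w : ℤ) := by
  unfold Kpoly
  rw [Finset.sum_eq_single 0]
  · simp
  · intro s _ hs
    cases s with
    | zero => exact absurd rfl hs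
    | succ t => simp [Nat.choose_eq_zero_of_lt (Nat.succ_pos t)]
  · intro h; exact absurd (Finset.mem_range.mpr (Nat.succ_pos w)) h

theorem mul_one_sub_X_coeff (p : Polynomial ℤ) (v : ℕ) :
    (p * (1 - Polynomial.X)).coeff (v + 1) = p.coeff (v + 1) - p.coeff v := by
  rw [mul_sub, mul_one, Polynomial.coeff_sub, Polynomial.coeff_mul_X]

theorem mul_one_add_X_coeff (p : Polynomial ℤ) (v : ℕ) :
    (p * (1 + Polynomial.X)).coeff (v + 1) = p.coeff (v + 1) + p.coeff v := by
  rw [mul_add, mul_one, Polynomial.coeff_add, Polynomial.coeff_mul_X]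

theorem coeff_one_sub_X_pow (j s : ℕ) :
    ((1 - Polynomial.X : Polynomial ℤ) ^ j).coeff s = (-1 : ℤ) ^ s * (j.choose s : ℤ) := by
  induction j generalizing s with
  | zero =>
    cases s with
    | zero => simp
    | succ t => simp [Polynomial.coeff_one, Nat.choose_eq_zero_of_lt (Nat.succ_pos t)]
  | succ j ih =>
    rw [pow_succ]
    cases s with
    | zero => rw [Polynomial.mul_coeff_zero, ih]; simp
    | succ t =>
      rw [mul_one_sub_X_coeff, ih, ih, Nat.choose_succ_succ]
      push_cast
      ring

theorem Kpoly_eq_coeff (n j w : ℕ) :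
    ((1 - Polynomial.X : Polynomial ℤ) ^ j * (1 + Polynomial.X) ^ (n - j)).coeff w
      = Kpoly n j w := by
  rw [Polynomial.coeff_mul, Finset.Nat.sum_antidiagonal_eq_sum_range_succ_mk]
  unfold Kpoly
  refine Finset.sum_congr rfl (fun s _ => ?_)
  rw [coeff_one_sub_X_pow, Polynomial.coeff_one_add_X_pow, mul_assoc]

theorem Kpoly_rec (n j v : ℕ) (h : j < n) :
    Kpoly n (j + 1) (v + 1) = (Kpoly n j (v + 1) - Kpoly n j v) - Kpoly n (j + 1) v := by
  have key : (1 - Polynomial.X : Polynomial ℤ) ^ (j+1) * (1 + Polynomial.X) ^ (n - (j+1)) * (1 + Polynomial.X)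
      = (1 - Polynomial.X) ^ j * (1 + Polynomial.X) ^ (n - j) * (1 - Polynomial.X) := by
    have : n - j = (n - (j+1)) + 1 := by omega
    rw [this, pow_succ, pow_succ]
    ring
  have := congrArg (fun p => Polynomial.coeff p (v+1)) key
  simp only [mul_one_add_X_coeff, mul_one_sub_X_coeff, Kpoly_eq_coeff] at this
  linarith

theorem zip_map_range {α β : Type} (g : ℕ → α) (h : ℕ → β) (m1 m2 : ℕ) :
    ((List.range m1).map g).zip ((List.range m2).map h)
      = (List.range (min m1 m2)).map (fun v => (g v, h v)) := by
  apply List.ext_getElem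
  · simp
  · intro i h1 h2
    simp [List.getElem_zip]

theorem tail_map_range {α : Type} (f : ℕ → α) (m : ℕ) :
    ((List.range (m + 1)).map f).tail = (List.range m).map (fun v => f (v + 1)) := by
  rw [List.range_succ_eq_map]
  simp [Function.comp]

theorem headD_map_range (f : ℕ → Int) (m : ℕ) :
    ((List.range (m + 1)).map f).headD 0 = f 0 := by
  rw [List.range_succ_eq_map]; rfl

theorem pascalNext_map (f : ℕ → Int) (m : ℕ) :
    pascalNext ((List.range (m + 1)).map f)
      = f 0 :: (List.range m).map (fun v => f (v + 1) + f v) := by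
  unfold pascalNext
  rw [headD_map_range, tail_map_range, zip_map_range]
  have : min m (m+1) = m := by omega
  simp [this]

theorem pascal_iterate (m k : ℕ) :
    pascalNext^[k] ((1 : Int) :: List.replicate m 0)
      = (List.range (m + 1)).map (fun w => (k.choose w : ℤ)) := by
  induction k with
  | zero =>
    rw [Function.iterate_zero_apply, List.range_succ_eq_map]
    simp only [List.map_cons, List.map_map, Function.comp_def, Nat.choose_zero_right, Nat.cast_one]
    congr 1
    exact (List.eq_replicate_iff.mpr ⟨by simp, by simp⟩).symm
  | succ k ih =>
    rw [Function.iterate_succ_apply', ih, pascalNext_map, List.range_succ_eq_map]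
    simp only [List.map_cons, List.map_map, Function.comp]
    congr 1
    · simp
    · refine List.map_congr_left (fun v _ => ?_)
      show ((k.choose (v+1) : ℤ) + k.choose v) = ((k+1).choose (v+1) : ℤ)
      rw [Nat.choose_succ_succ']
      push_cast; ring

theorem scanNeg_map (m : ℕ) (d g : ℕ → ℤ) (h : ∀ v, v < m → g (v + 1) = d v - g v) :
    scanNeg (g 0) ((List.range m).map d) = (List.range m).map (fun v => g (v + 1)) := by
  induction m generalizing d g with
  | zero => simp [scanNeg]
  | succ m ih =>
    rw [List.range_succ_eq_map, List.map_cons, List.map_cons]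
    simp only [List.map_map, Function.comp]
    rw [scanNeg, ← h 0 (Nat.succ_pos m)]
    congr 1
    exact ih (fun v => d (v + 1)) (fun v => g (v + 1)) (fun v hv => h (v + 1) (by omega))

-- the w-indexed row of Krawtchouk numbers for a fixed j
def krow (n j : ℕ) : List Int := (List.range (n + 1)).map (fun w => Kpoly n j w)

theorem nextKRow_krow (n j : ℕ) (h : j < n) : nextKRow (krow n j) = krow n (j + 1) := by
  unfold nextKRow krow
  rw [headD_map_range, tail_map_range, zip_map_range]
  have hmin : min (n + 1) n = n := by omega
  rw [hmin]
  simp only [List.map_map, Function.comp_def]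
  rw [Kpoly_w_zero]
  have h0 : (1 : ℤ) = Kpoly n (j + 1) 0 := (Kpoly_w_zero n (j+1)).symm
  rw [h0, scanNeg_map n _ (fun v => Kpoly n (j+1) v) (fun v _ => Kpoly_rec n j v h)]
  rw [List.range_succ_eq_map]
  simp [Function.comp_def, Kpoly_w_zero]

theorem foldl_ite_add {α : Type} (l : List α) (c : α → Prop) [DecidablePred c] (t : α → ℤ)
    (init : ℤ) :
    l.foldl (fun val s => if c s then val else val + t s) init
      = init + (l.map (fun s => if c s then 0 else t s)).sum := by
  induction l generalizing init with
  | nil => simp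
  | cons x xs ih => simp only [List.foldl_cons, List.map_cons, List.sum_cons, ih]; split_ifs <;> ring

theorem foldl_add_sum {α : Type} (l : List α) (t : α → ℤ) (init : ℤ) :
    l.foldl (fun val s => val + t s) init = init + (l.map t).sum := by
  induction l generalizing init with
  | nil => simp
  | cons x xs ih => simp only [List.foldl_cons, List.map_cons, List.sum_cons, ih]; ring

theorem list_range_sum (f : ℕ → ℤ) (m : ℕ) :
    ((List.range m).map f).sum = ∑ s ∈ Finset.range m, f s := by
  induction m with
  | zero => simp
  | succ m ih => rw [List.range_succ, Finset.sum_range_succ, List.map_append, List.sum_append, ih]; simp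

theorem krawtchouk_eq (n j w : ℕ) (hj : j ≤ n) :
    krawtchouk (n : Int) 2 (w : Int) (j : Int) = Kpoly n j w := by
  unfold krawtchouk
  rw [show (min (w : Int) (j : Int)) = ((min w j : ℕ) : Int) by push_cast; rfl]
  rw [PySem.List.pyRange_one]
  have hM : ((((min w j : ℕ) : Int) + 1 - 0).toNat) = min w j + 1 := by omega
  rw [hM, List.foldl_map, foldl_ite_add, zero_add, list_range_sum]
  have hsub : Finset.range (min w j + 1) ⊆ Finset.range (w + 1) := by
    intro x hx; simp only [Finset.mem_range] at *; omega
  rw [Kpoly, ← Finset.sum_subset hsub ?zero]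
  case zero =>
    intro s hs hns
    simp only [Finset.mem_range] at hs hns
    have hjs : j < s := by
      rcases Nat.le_total w j with hh | hh
      · simp [Nat.min_eq_left hh] at hns; omega
      · simp [Nat.min_eq_right hh] at hns; omega
    simp [Nat.choose_eq_zero_of_lt hjs]
  refine Finset.sum_congr rfl (fun s hs => ?_)
  simp only [Finset.mem_range] at hs
  have hsw : s ≤ w := by omega
  have hsj : s ≤ j := by omega
  have hcast1 : ((0 : Int) + (s : Int)) = (s : Int) := by ring
  simp only [hcast1]
  have hwz : ((w : Int) - s) = ((w - s : ℕ) : Int) := by omega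
  have hnz : ((n : Int) - j) = ((n - j : ℕ) : Int) := by omega
  by_cases hc : ((w : Int) - s > (n : Int) - j)
  · rw [if_pos hc]
    have : n - j < w - s := by omega
    simp [Nat.choose_eq_zero_of_lt this]
  · rw [if_neg hc]
    unfold pyComb
    rw [hwz, hnz]
    simp [Int.toNat_natCast]

-- the accumulator after the rows for j = 0 .. j have been added
def accAt (A : List Int) (m j : ℕ) : List Int :=
  (List.range (m + 1)).map
    (fun w => ∑ i ∈ Finset.range (j + 1), PySem.List.pyGetD A (i : Int) 0 * Kpoly m i w)

theorem loop_inv (A : List Int) (m : ℕ) :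
    ∀ (t j : ℕ), j + t = m →
    ((List.range t).map (fun k => ((j + 1 + k : ℕ) : Int))).foldl
      (fun (st : List Int × List Int) x =>
        let row := nextKRow st.2
        ((st.1.zip row).map (fun p => p.1 + PySem.List.pyGetD A x 0 * p.2), row))
      (accAt A m j, krow m j)
    = (accAt A m m, krow m m) := by
  intro t
  induction t with
  | zero => intro j hj; simp only [List.range_zero, List.map_nil, List.foldl_nil]; rw [Nat.add_zero] at hj; rw [hj]
  | succ t ih =>
    intro j hj
    rw [List.range_succ_eq_map, List.map_cons, List.foldl_cons]
    have hstep :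
        (((accAt A m j).zip (nextKRow (krow m j))).map
            (fun p => p.1 + PySem.List.pyGetD A ((j + 1 + 0 : ℕ) : Int) 0 * p.2),
          nextKRow (krow m j)) = (accAt A m (j + 1), krow m (j + 1)) := by
      rw [nextKRow_krow m j (by omega)]
      refine Prod.ext ?_ rfl
      show ((accAt A m j).zip (krow m (j+1))).map _ = accAt A m (j+1)
      unfold accAt krow
      rw [zip_map_range]
      have : min (m + 1) (m + 1) = m + 1 := by omega
      rw [this, List.map_map]
      refine List.map_congr_left (fun w _ => ?_)
      rw [Finset.sum_range_succ _ (j + 1)]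
      norm_num
    rw [hstep]
    have hmap : ((List.range t).map Nat.succ).map (fun k => ((j + 1 + k : ℕ) : Int))
        = (List.range t).map (fun k => (((j + 1) + 1 + k : ℕ) : Int)) := by
      rw [List.map_map]
      refine List.map_congr_left (fun k _ => ?_)
      simp [Function.comp]
      omega
    rw [hmap]
    exact ih (j + 1) (by omega)

theorem macwilliams_transform_spec' (A : List Int) (n : Int) (code_size : Int)
    (h : Pre_macwilliams_transform A n code_size) :
    macwilliams_transform A n code_size = macwilliams_transform_alt A n code_size := by
  by_cases hn : n < 0
  · unfold macwilliams_transform macwilliams_transform_alt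
    rw [if_pos hn, PySem.List.pyRange_one_eq_nil (by omega), List.foldl_nil]
  · push_neg at hn
    set m := n.toNat with hm
    have hnm : n = (m : Int) := by omega
    -- A side: turn the appending fold into a map over List.range (m + 1)
    unfold macwilliams_transform
    rw [PySem.List.foldl_append_singleton_eq_map, List.nil_append]
    rw [show n + 1 = ((m + 1 : ℕ) : Int) by omega]
    rw [PySem.List.pyRange_one]
    rw [show ((((m + 1 : ℕ) : Int)) - 0).toNat = m + 1 by omega]
    rw [List.map_map]
    -- B side
    unfold macwilliams_transform_alt
    rw [if_neg (by omega)]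
    simp only []
    rw [show n.toNat = m from rfl, pascal_iterate]
    have hrow0 : (List.range (m + 1)).map (fun w => (m.choose w : ℤ)) = krow m 0 := by
      unfold krow
      exact List.map_congr_left (fun w _ => (Kpoly_j_zero m w).symm)
    rw [hrow0]
    have hacc0 : (krow m 0).map (fun c => PySem.List.pyGetD A 0 0 * c) = accAt A m 0 := by
      unfold krow accAt
      rw [List.map_map]
      refine List.map_congr_left (fun w _ => ?_)
      rw [Finset.sum_range_one]
      norm_num
    rw [hacc0]
    rw [show n + 1 = ((m + 1 : ℕ) : Int) by omega]
    rw [PySem.List.pyRange_one]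
    rw [show ((((m + 1 : ℕ) : Int)) - 1).toNat = m by omega]
    have hloopargs : (List.range m).map (fun k : ℕ => (1 : Int) + (k : Int))
        = (List.range m).map (fun k : ℕ => ((0 + 1 + k : ℕ) : Int)) := by
      refine List.map_congr_left (fun k _ => ?_)
      push_cast; ring
    rw [hloopargs, loop_inv A m m 0 (by omega)]
    -- both sides are maps over List.range (m + 1); compare pointwise
    unfold accAt
    rw [List.map_map]
    refine List.map_congr_left (fun w hw => ?_)
    simp only [Function.comp_apply]
    congr 1
    rw [List.foldl_map, foldl_add_sum, zero_add, list_range_sum]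
    refine Finset.sum_congr rfl (fun i hi => ?_)
    simp only [Finset.mem_range] at hi hw
    have hiz : ((0 : Int) + (i : Int)) = ((i : ℕ) : Int) := by ring
    have hwz : ((0 : Int) + (w : Int)) = ((w : ℕ) : Int) := by ring
    rw [hiz, hwz, hnm, krawtchouk_eq m i w (by omega)]


-- ===== VERDICT (by name: the statement is the Claim_ definition above) =====
theorem macwilliams_transform_spec : Claim_equal_macwilliams_transform := by
  intro A n code_size _ hpre
  exact macwilliams_transform_spec' A n code_size hpre
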